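-- pv_equiv track=rewrite | github.com/Vladimirs77nt/Flask-FastAPI | Seminar_4/apk_7.py | create_index_list
-- ===== SOURCE A (Python) =====
-- COUNT = 10_000_000  # количество чисел
--
-- def create_index_list(procs):
--     sizeSegment = COUNT//procs      # кол-во элементов в одном потоке/процессе
--     index_list = []                 # список срезов списка для потоков/процессов
--     index_start = 0
--     for i in range(procs):
--         if i < (procs-1):
--             index_list.append([index_start, index_start+sizeSegment-1])
--             index_start += sizeSegment
--         else:
--             index_list.append([index_start, COUNT-1])
--     return index_list
-- ===== SOURCE B (Python) =====
-- COUNT = 10_000_000  # количество чисел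
--
-- def create_index_list(procs):
--     size = COUNT // procs           # preserves ZeroDivisionError for procs == 0
--     b = [i * size for i in range(procs)] + [COUNT]   # segment boundaries, COUNT as sentinel
--     return [[lo, hi - 1] for lo, hi in zip(b, b[1:])]
-- ===== Notes on version B (the rewrite author's own statement) =====
-- stated objective: simpler
-- what changed: Replaced the accumulator loop with its i < procs-1 special case by a boundary table b = [i*size for i in range(procs)] + [COUNT] and a branch-free zip of adjacent boundaries.
-- outside the precondition, e.g. on create_index_list(0): A raises ZeroDivisionError, B raises ZeroDivisionError
import Mathlib
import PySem

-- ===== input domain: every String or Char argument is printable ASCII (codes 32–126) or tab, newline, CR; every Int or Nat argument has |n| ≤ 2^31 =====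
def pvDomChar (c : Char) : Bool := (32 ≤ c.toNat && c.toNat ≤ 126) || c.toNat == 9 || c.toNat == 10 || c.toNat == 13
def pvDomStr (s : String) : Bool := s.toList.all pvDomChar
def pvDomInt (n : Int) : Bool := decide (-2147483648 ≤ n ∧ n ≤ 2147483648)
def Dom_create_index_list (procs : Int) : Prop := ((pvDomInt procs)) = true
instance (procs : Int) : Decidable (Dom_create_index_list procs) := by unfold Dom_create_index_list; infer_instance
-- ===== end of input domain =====

-- B replaces A's accumulator loop (with its i < procs-1 special case) by a boundary table
-- zipped with itself shifted by one; objective: simpler, branch-free. Same return value.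

def pyCOUNT : Int := 10000000

-- ===== PORT A =====
def create_index_list (procs : Int) : List (List Int) :=
  let sizeSegment := PySem.Int.floordiv pyCOUNT procs
  let st := (PySem.List.pyRange 0 procs 1).foldl
    (fun (st : List (List Int) × Int) i =>
      if i < procs - 1 then
        (st.1 ++ [[st.2, st.2 + sizeSegment - 1]], st.2 + sizeSegment)
      else
        (st.1 ++ [[st.2, pyCOUNT - 1]], st.2))
    ([], 0)
  st.1

-- ===== PORT B =====
-- b[1:] on a Python list equals List.drop 1 (exact: for start index 1 the slice drops the head)
def create_index_list_alt (procs : Int) : List (List Int) :=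
  let size := PySem.Int.floordiv pyCOUNT procs
  let b := (PySem.List.pyRange 0 procs 1).map (fun i => i * size) ++ [pyCOUNT]
  (b.zip (b.drop 1)).map (fun p => [p.1, p.2 - 1])

-- ===== PRECONDITION & SPEC =====
-- Pre_ excludes exactly procs = 0, where Python A raises ZeroDivisionError.
def Pre_create_index_list (procs : Int) : Prop := procs ≠ 0
instance (procs : Int) : Decidable (Pre_create_index_list procs) := by unfold Pre_create_index_list; infer_instance
def pvWitness_create_index_list : Int := 4
def Spec_create_index_list (procs : Int) (out : List (List Int)) : Prop := out = create_index_list_alt procs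
instance (procs : Int) (out : List (List Int)) : Decidable (Spec_create_index_list procs out) := by unfold Spec_create_index_list; infer_instance

-- ===== CLAIM (what is proved, stated in full; the proofs are below) =====
def Claim_equal_create_index_list : Prop := ∀ (procs : Int), Dom_create_index_list procs → Pre_create_index_list procs → Spec_create_index_list procs (create_index_list procs)

-- ===== LEMMAS AND PROOFS =====

-- A's loop over the first k indices (all taking the `if` branch): closed form.
theorem foldA_if_branch (procs size : Int) (k : Nat) (hk : (k : Int) ≤ procs - 1) :
    (PySem.List.pyRange 0 (k : Int) 1).foldl
      (fun (st : List (List Int) × Int) i =>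
        if i < procs - 1 then
          (st.1 ++ [[st.2, st.2 + size - 1]], st.2 + size)
        else
          (st.1 ++ [[st.2, pyCOUNT - 1]], st.2))
      ([], 0)
    = ((List.range k).map (fun (j : Nat) => [(j : Int) * size, ((j : Int) + 1) * size - 1]),
       (k : Int) * size) := by
  induction k with
  | zero => simp [PySem.List.pyRange_one_eq_nil]
  | succ n ih =>
    have hn : (n : Int) ≤ procs - 1 := by push_cast at hk; omega
    have hstep : ((n : Int)) < procs - 1 := by push_cast at hk; omega
    rw [show (((n+1 : Nat)) : Int) = (n : Int) + 1 by push_cast; ring]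
    rw [PySem.List.pyRange_one_succ_right (by positivity), List.foldl_append, ih hn]
    simp only [List.foldl_cons, List.foldl_nil, if_pos hstep, List.range_succ,
      List.map_append, List.map_cons, List.map_nil, Prod.mk.injEq]
    constructor
    · ring_nf
    · ring

theorem create_index_list_spec_aux (procs : Int) (hne : procs ≠ 0) :
    create_index_list procs = create_index_list_alt procs := by
  rcases lt_or_gt_of_ne hne with hneg | hpos
  · -- procs < 0: both ranges are empty
    have h : PySem.List.pyRange 0 procs 1 = [] :=
      PySem.List.pyRange_one_eq_nil (by omega)
    simp [create_index_list, create_index_list_alt, h]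
  · -- procs > 0
    obtain ⟨n, rfl⟩ : ∃ n : Nat, procs = (n : Int) + 1 := by
      refine ⟨(procs - 1).toNat, ?_⟩; omega
    set size := PySem.Int.floordiv pyCOUNT ((n : Int) + 1) with hsize
    have hsplit : PySem.List.pyRange 0 ((n : Int) + 1) 1
        = PySem.List.pyRange 0 (n : Int) 1 ++ [(n : Int)] :=
      PySem.List.pyRange_one_succ_right (by positivity)
    have hfold := foldA_if_branch ((n : Int) + 1) size n (by omega)
    -- A's value
    have hA : create_index_list ((n : Int) + 1)
        = (List.range n).map (fun (j : Nat) => [(j : Int) * size, ((j : Int) + 1) * size - 1])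
          ++ [[(n : Int) * size, pyCOUNT - 1]] := by
      simp only [create_index_list, ← hsize, hsplit, List.foldl_append, hfold]
      simp
    -- B's value, elementwise
    have hB : create_index_list_alt ((n : Int) + 1)
        = (List.range n).map (fun (j : Nat) => [(j : Int) * size, ((j : Int) + 1) * size - 1])
          ++ [[(n : Int) * size, pyCOUNT - 1]] := by
      simp only [create_index_list_alt, ← hsize]
      have hrange : (PySem.List.pyRange 0 ((n : Int) + 1) 1).map (fun i => i * size)
          = (List.range (n + 1)).map (fun (k : Nat) => (k : Int) * size) := by
        rw [PySem.List.pyRange_one]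
        simp [List.map_map, Function.comp]
      rw [hrange]
      set bl : List Int :=
        (List.range (n + 1)).map (fun (k : Nat) => (k : Int) * size) ++ [pyCOUNT] with hbl
      have hlen : bl.length = n + 2 := by simp [hbl]
      have hget : ∀ (i : Nat) (h : i < bl.length), bl[i] = if i ≤ n then (i : Int) * size else pyCOUNT := by
        intro i h
        by_cases hle : i ≤ n
        · simp only [hbl]
          rw [List.getElem_append_left (by simp; omega), List.getElem_map, List.getElem_range]
          simp [hle]
        · have : i = n + 1 := by omega
          subst this
          simp only [hbl]
          rw [List.getElem_append_right (by simp)]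
          simp
      apply List.ext_getElem
      · simp [List.length_zip, hlen]
      · intro i h1 h2
        simp only [List.length_map, List.length_zip, List.length_drop, hlen,
          List.length_append, List.length_range] at h1 h2
        rw [List.getElem_map, List.getElem_zip, List.getElem_drop]
        rw [hget i (by omega), hget (1 + i) (by omega)]
        by_cases hlt : i < n
        · rw [List.getElem_append_left (by simp; omega), List.getElem_map, List.getElem_range]
          have h1' : i ≤ n := by omega
          have h2' : 1 + i ≤ n := by omega
          simp only [if_pos h1', if_pos h2']
          push_cast; ring_nf
        · have hi : i = n := by omega
          subst hi
          rw [List.getElem_append_right (by simp)]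
          simp
    rw [hA, hB]

-- ===== VERDICT (by name: the statement is the Claim_ definition above) =====
theorem create_index_list_spec : Claim_equal_create_index_list := by
  intro procs _ hpre
  unfold Spec_create_index_list
  exact create_index_list_spec_aux procs hpre
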